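-- pv_equiv track=rewrite | github.com/vagnur/Power-Indices | power_index_calculator.py | _winning_coalitions
-- ===== SOURCE A (Python) =====
-- from itertools import combinations
--
-- def _winning_coalitions(players, quota):
--     """
--     List the winning coalitions of a given game.
--
--     Parameters
--     ----------
--     players : dictionary
--                 Name of the the players and their weights.
--     quota   : int
--                 Necesary weight to win the game.
--
--     Yields
--     -------
--     list
--         A winning coalition.
--
--     """
--     if quota <= 0:
--         for coalition_size in range(len(players)+1):
--             for coalition in combinations(players, coalition_size):
--                 yield coalition
--     elif not players:
--         pass
--     else:
--         player_name, player_votes = players[-1]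
--         players = players[:-1]
--         for coalition in _winning_coalitions(players, quota-player_votes):
--             yield ((player_name, player_votes),) + coalition
--             if sum([votes for (name, votes) in coalition]) >= quota:
--                 yield coalition
-- ===== SOURCE B (Python) =====
-- from itertools import combinations
--
-- def _winning_coalitions(players, quota):
--     # Phase 1: peel players off the right while the residual quota stays positive.
--     prefix = list(players)
--     q = quota
--     while prefix and q > 0:
--         q -= prefix[-1][1]
--         prefix.pop()
--     if q > 0:
--         return
--     # Base: every coalition of the remaining prefix wins (residual quota <= 0),
--     # listed by size then lexicographically, each paired with its weight (summed once).
--     cur = [(c, sum(v for _, v in c))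
--            for size in range(len(prefix) + 1)
--            for c in combinations(prefix, size)]
--     # Phase 2: reattach the peeled players left-to-right, rewriting the worklist;
--     # the running weight is threaded, so no coalition is ever re-summed.
--     for p in players[len(prefix):]:
--         q += p[1]
--         cur = [item for (c, w) in cur
--                for item in ([((p,) + c, w + p[1])] + ([(c, w)] if w >= q else []))]
--     for c, _ in cur:
--         yield c
-- ===== Notes on version B (the rewrite author's own statement) =====
-- stated objective: alternative
-- what changed: B replaces A's right-peeling recursion with an iterative two-phase algorithm: a while loop first peels players off the right until the residual quota is non-positive, then the base worklist of (coalition, weight) pairs over the remaining prefix is rewritten level by level in a left-to-right loop that threads the running weight, so no coalition is ever re-summed.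
import Mathlib
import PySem

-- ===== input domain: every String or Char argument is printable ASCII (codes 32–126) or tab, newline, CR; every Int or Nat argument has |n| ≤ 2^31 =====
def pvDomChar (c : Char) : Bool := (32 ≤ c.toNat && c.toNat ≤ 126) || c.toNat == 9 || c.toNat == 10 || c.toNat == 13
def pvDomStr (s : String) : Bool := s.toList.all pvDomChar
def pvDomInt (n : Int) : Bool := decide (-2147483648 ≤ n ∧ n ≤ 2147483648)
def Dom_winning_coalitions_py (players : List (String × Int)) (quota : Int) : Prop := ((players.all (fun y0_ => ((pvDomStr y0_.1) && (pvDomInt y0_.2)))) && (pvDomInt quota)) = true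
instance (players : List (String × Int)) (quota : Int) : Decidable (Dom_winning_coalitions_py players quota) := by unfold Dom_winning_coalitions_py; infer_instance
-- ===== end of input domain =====

-- B replaces A's right-peeling recursion by an iterative two-phase algorithm
-- (peel residual quotas with a loop, then rewrite a weighted worklist level by level),
-- threading the running weight so no coalition is re-summed (objective: alternative).

-- ===== PORT A =====
-- itertools.combinations(players, k) in its documented lexicographic order
def pyCombinations : List (String × Int) → Nat → List (List (String × Int))
  | _, 0 => [[]]
  | [], _ + 1 => []
  | x :: xs, k + 1 => (pyCombinations xs k).map (fun c => x :: c) ++ pyCombinations xs (k + 1)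

-- players[-1] → .getLast, players[:-1] → .dropLast; each 'yield' appends to the result list
def winning_coalitions_py (players : List (String × Int)) (quota : Int) : List (List (String × Int)) :=
  if quota ≤ 0 then
    (List.range (players.length + 1)).flatMap (fun k => pyCombinations players k)
  else
    match players with
    | [] => []
    | a :: as =>
      (winning_coalitions_py ((a :: as).dropLast) (quota - ((a :: as).getLast (by simp)).2)).flatMap
        (fun c =>
          [((a :: as).getLast (by simp)) :: c] ++
            (if ((c.map Prod.snd).sum) ≥ quota then [c] else []))
termination_by players.length
decreasing_by simp

-- ===== PORT B =====
-- the while loop: state is (prefix, q); pops from the right while prefix ≠ [] and q > 0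
def peelL (ps : List (String × Int)) (q : Int) : List (String × Int) × Int :=
  if h : ps ≠ [] ∧ 0 < q then
    peelL ps.dropLast (q - (ps.getLast h.1).2)
  else (ps, q)
termination_by ps.length
decreasing_by cases ps with
  | nil => exact absurd rfl h.1
  | cons x xs => simp

-- the for-loop over the peeled suffix: rewrites the worklist of (coalition, weight) pairs
def buildUp : List (String × Int) → Int → List (List (String × Int) × Int) → List (List (String × Int) × Int)
  | [], _, cur => cur
  | p :: rest, q, cur =>
      buildUp rest (q + p.2)
        (cur.flatMap (fun cw =>
          [(p :: cw.1, cw.2 + p.2)] ++ (if cw.2 ≥ q + p.2 then [cw] else [])))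

-- the worklist 'cur' after both phases ([] when the residual quota stayed positive)
def curW (players : List (String × Int)) (quota : Int) : List (List (String × Int) × Int) :=
  let pr := peelL players quota
  if 0 < pr.2 then []
  else
    buildUp (players.drop pr.1.length) pr.2
      ((List.range (pr.1.length + 1)).flatMap
        (fun s => (pyCombinations pr.1 s).map (fun c => (c, (c.map Prod.snd).sum))))

def winning_coalitions_py_alt (players : List (String × Int)) (quota : Int) : List (List (String × Int)) :=
  (curW players quota).map Prod.fst

-- ===== PRECONDITION & SPEC =====
def Spec_winning_coalitions_py (players : List (String × Int)) (quota : Int) (out : List (List (String × Int))) : Prop := out = winning_coalitions_py_alt players quota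
instance (players : List (String × Int)) (quota : Int) (out : List (List (String × Int))) : Decidable (Spec_winning_coalitions_py players quota out) := by unfold Spec_winning_coalitions_py; infer_instance

-- ===== CLAIM (what is proved, stated in full; the proofs are below) =====
def Claim_equal_winning_coalitions_py : Prop := ∀ (players : List (String × Int)) (quota : Int), Dom_winning_coalitions_py players quota → Spec_winning_coalitions_py players quota (winning_coalitions_py players quota)

-- ===== LEMMAS AND PROOFS =====

-- attach to each coalition its weight
def withW (c : List (String × Int)) : List (String × Int) × Int := (c, (c.map Prod.snd).sum)

theorem peelL_nil (q : Int) : peelL [] q = ([], q) := by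
  rw [peelL]; simp

theorem peelL_nonpos (ps : List (String × Int)) (q : Int) (h : ¬ 0 < q) :
    peelL ps q = (ps, q) := by
  rw [peelL]; simp [h]

theorem peelL_snoc (as : List (String × Int)) (a : String × Int) (q : Int) (h : 0 < q) :
    peelL (as ++ [a]) q = peelL as (q - a.2) := by
  rw [peelL]
  simp [h]

theorem peelL_decomp (ps : List (String × Int)) (q : Int) :
    ∃ suf, ps = (peelL ps q).1 ++ suf ∧ (peelL ps q).2 + (suf.map Prod.snd).sum = q := by
  induction ps using List.reverseRecOn generalizing q with
  | nil => exact ⟨[], by simp [peelL_nil]⟩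
  | append_singleton as a ih =>
    by_cases hq : 0 < q
    · rw [peelL_snoc as a q hq]
      obtain ⟨suf, h1, h2⟩ := ih (q - a.2)
      exact ⟨suf ++ [a], by rw [← List.append_assoc, ← h1], by simp; omega⟩
    · exact ⟨[], by simp [peelL_nonpos _ _ hq]⟩

theorem buildUp_snoc (xs : List (String × Int)) (a : String × Int) (q : Int)
    (cur : List (List (String × Int) × Int)) :
    buildUp (xs ++ [a]) q cur =
      (buildUp xs q cur).flatMap (fun cw =>
        [(a :: cw.1, cw.2 + a.2)] ++
          (if cw.2 ≥ q + (xs.map Prod.snd).sum + a.2 then [cw] else [])) := by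
  induction xs generalizing q cur with
  | nil => simp [buildUp]
  | cons x xs ih =>
    simp only [List.cons_append, buildUp]
    rw [ih]
    congr 1
    funext cw
    have h : q + x.2 + (List.map Prod.snd xs).sum + a.2
        = q + (List.map Prod.snd (x :: xs)).sum + a.2 := by
      simp only [List.map_cons, List.sum_cons]; ring
    rw [h]
    simp

theorem curW_nonpos (ps : List (String × Int)) (q : Int) (h : q ≤ 0) :
    curW ps q = ((List.range (ps.length + 1)).flatMap (fun k => pyCombinations ps k)).map withW := by
  unfold curW
  rw [peelL_nonpos ps q (by omega)]
  simp only [if_neg (by simpa using h : ¬ 0 < q)]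
  rw [List.drop_length]
  simp only [buildUp, List.map_flatMap]
  rfl

theorem A_snoc (as : List (String × Int)) (a : String × Int) (q : Int) (h : 0 < q) :
    winning_coalitions_py (as ++ [a]) q =
      (winning_coalitions_py as (q - a.2)).flatMap
        (fun c => [a :: c] ++ (if ((c.map Prod.snd).sum) ≥ q then [c] else [])) := by
  rw [winning_coalitions_py.eq_def]
  obtain ⟨x, xs, hx⟩ : ∃ x xs, as ++ [a] = x :: xs := by
    cases as with
    | nil => exact ⟨a, [], rfl⟩
    | cons b bs => exact ⟨b, bs ++ [a], rfl⟩
  rw [hx]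
  simp only [if_neg (by omega : ¬ q ≤ 0), ← hx, List.dropLast_concat, List.getLast_concat]

theorem curW_eq (ps : List (String × Int)) (q : Int) :
    curW ps q = (winning_coalitions_py ps q).map withW := by
  induction ps using List.reverseRecOn generalizing q with
  | nil =>
    by_cases hq : q ≤ 0
    · rw [curW_nonpos [] q hq, winning_coalitions_py.eq_def]
      simp [hq]
    · rw [winning_coalitions_py.eq_def]
      simp only [if_neg hq]
      unfold curW
      rw [peelL_nil]
      simp [show 0 < q by omega]
  | append_singleton as a ih =>
    by_cases hq : q ≤ 0
    · rw [curW_nonpos _ q hq, winning_coalitions_py.eq_def]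
      simp [hq]
    · have hq' : 0 < q := by omega
      rw [A_snoc as a q hq']
      unfold curW
      rw [peelL_snoc as a q hq']
      by_cases hp : 0 < (peelL as (q - a.2)).2
      · -- residual quota stayed positive: both sides are empty
        have hA : winning_coalitions_py as (q - a.2) = [] := by
          have := ih (q - a.2)
          unfold curW at this
          rw [if_pos hp] at this
          exact (List.map_eq_nil_iff.mp this.symm)
        simp [hp, hA]
      · rw [if_neg hp]
        obtain ⟨suf, hdec, hsum⟩ := peelL_decomp as (q - a.2)
        set pr := peelL as (q - a.2) with hpr
        have hdrop : (as ++ [a]).drop pr.1.length = suf ++ [a] := by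
          conv_lhs => rw [hdec, List.append_assoc]
          rw [List.drop_left]
        have hdropas : as.drop pr.1.length = suf := by
          conv_lhs => rw [hdec]
          rw [List.drop_left]
        rw [hdrop, buildUp_snoc]
        have hcur : buildUp suf pr.2
            ((List.range (pr.1.length + 1)).flatMap
              (fun s => (pyCombinations pr.1 s).map
                (fun c => (c, (c.map Prod.snd).sum)))) =
            (winning_coalitions_py as (q - a.2)).map withW := by
          have h2 := ih (q - a.2)
          unfold curW at h2
          rw [← hpr, if_neg hp, hdropas] at h2
          exact h2
        rw [hcur]
        have hthr : pr.2 + (suf.map Prod.snd).sum + a.2 = q := by omega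
        rw [hthr, List.flatMap_map, List.map_flatMap]
        congr 1
        funext c
        by_cases hc : (c.map Prod.snd).sum ≥ q <;>
          simp [withW, hc, Int.add_comm]

-- ===== VERDICT (by name: the statement is the Claim_ definition above) =====
theorem winning_coalitions_py_spec : Claim_equal_winning_coalitions_py := by
  intro players quota _
  unfold Spec_winning_coalitions_py winning_coalitions_py_alt
  rw [curW_eq, List.map_map]
  conv_rhs => rw [show (Prod.fst ∘ withW) = id from rfl]
  rw [List.map_id]
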